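-- pv_equiv track=rewrite | github.com/kalebers/Leetcode | checksum_bytes.py | compute_checksums
-- ===== SOURCE A (Python) =====
-- from typing import List
--
-- def compute_checksums(file_bytes: List[int]) -> List[int]:
--     checksums = []
--
--     index = 0
--     while index < len(file_bytes):
--         # Extract header to determine chunk size
--         chunk_size = file_bytes[index]
--
--         # Calculate checksum for the chunk (excluding the header)
--         checksum = sum(file_bytes[index + 1: index + 1 + chunk_size]) % 256
--         checksums.append(checksum)
--
--         # Move to the next chunk or end of the file
--         index += chunk_size + 1
--
--     return checksums
-- ===== SOURCE B (Python) =====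
-- from typing import List
--
-- def compute_checksums(file_bytes: List[int]) -> List[int]:
--     checksums = []
--     remaining = 0
--     acc = 0
--     started = False
--     for b in file_bytes:
--         if remaining == 0:
--             if started:
--                 checksums.append(acc % 256)
--             remaining = b
--             acc = 0
--             started = True
--         else:
--             acc += b
--             remaining -= 1
--     if started:
--         checksums.append(acc % 256)
--     return checksums
-- ===== Notes on version B (the rewrite author's own statement) =====
-- stated objective: alternative
-- what changed: Replaced the index-jumping while loop that slices and sums each chunk with a single streaming left-to-right pass maintaining a state machine (bytes remaining in the current chunk, running sum, chunk-started flag), so no slicing or index arithmetic is needed.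
-- outside the precondition, e.g. on compute_checksums([0, -3, 9]): A returns [0, 0, 6], B returns [0, 9]; on compute_checksums([1, -5]): A returns [251], B returns [251]
import Mathlib
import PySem

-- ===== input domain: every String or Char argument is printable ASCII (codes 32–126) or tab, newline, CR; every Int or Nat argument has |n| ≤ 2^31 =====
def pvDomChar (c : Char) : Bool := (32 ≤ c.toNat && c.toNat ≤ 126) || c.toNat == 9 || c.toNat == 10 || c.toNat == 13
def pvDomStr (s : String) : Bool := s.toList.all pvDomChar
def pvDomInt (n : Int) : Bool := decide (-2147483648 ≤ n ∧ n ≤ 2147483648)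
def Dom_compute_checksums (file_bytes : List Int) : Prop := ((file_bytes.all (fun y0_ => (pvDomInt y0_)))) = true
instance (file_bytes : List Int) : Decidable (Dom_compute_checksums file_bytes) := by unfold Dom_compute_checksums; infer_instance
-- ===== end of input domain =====

-- B replaces A's index-jumping slice-and-sum loop by a single streaming pass with a
-- (remaining, acc, started) state machine; same cost, different decomposition.


-- ===== PORT A =====
-- A's while loop, as fuel recursion: under Pre_ every header is ≥ 0, so index strictly
-- increases and fuel length+1 is never exhausted (the fuel/none guards only make it total).
def compute_checksums_go (fb : List Int) (fuel : Nat) (index : Int) (checksums : List Int) : List Int :=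
  match fuel with
  | 0 => checksums
  | fuel + 1 =>
    if index < PySem.List.len fb then
      match PySem.List.pyGet? fb index with
      | none => checksums
      | some chunk_size =>
        let checksum := PySem.Int.mod (PySem.List.slice fb (some (index + 1)) (some (index + 1 + chunk_size))).sum 256
        compute_checksums_go fb fuel (index + chunk_size + 1) (checksums ++ [checksum])
    else checksums

def compute_checksums (file_bytes : List Int) : List Int :=
  compute_checksums_go file_bytes (file_bytes.length + 1) 0 []

-- ===== PORT B =====
-- state: (checksums, remaining, acc, started)
def compute_checksums_altStep (st : List Int × Int × Int × Bool) (b : Int) : List Int × Int × Int × Bool :=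
  let (cs, remaining, acc, started) := st
  if remaining = 0 then
    ((if started then cs ++ [PySem.Int.mod acc 256] else cs), b, 0, true)
  else
    (cs, remaining - 1, acc + b, started)

-- the final 'if started: append acc % 256' after the loop (projections on the state tuple)
def compute_checksums_finish (st : List Int × Int × Int × Bool) : List Int :=
  if st.2.2.2 then st.1 ++ [PySem.Int.mod st.2.2.1 256] else st.1

def compute_checksums_alt (file_bytes : List Int) : List Int :=
  compute_checksums_finish (file_bytes.foldl compute_checksums_altStep ([], 0, 0, false))

-- ===== PRECONDITION & SPEC =====
-- Pre_ restricts to all-nonnegative lists (genuine byte data): when a NEGATIVE value is read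
-- as a chunk header, A loops forever, raises IndexError, or returns a value produced by
-- accidental negative-index wraparound (e.g. [0,-3,9] → [0,0,6]); which positions are headers
-- is not expressible in closed form, so the whole-list nonnegativity condition also excludes
-- some lists with negative data bytes on which A and B agree.
def Pre_compute_checksums (file_bytes : List Int) : Prop := ∀ x ∈ file_bytes, 0 ≤ x
instance (file_bytes : List Int) : Decidable (Pre_compute_checksums file_bytes) := by
  unfold Pre_compute_checksums; infer_instance
def pvWitness_compute_checksums : List Int := [2, 10, 20, 0, 1, 300]

def Spec_compute_checksums (file_bytes : List Int) (out : List Int) : Prop := out = compute_checksums_alt file_bytes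
instance (file_bytes : List Int) (out : List Int) : Decidable (Spec_compute_checksums file_bytes out) := by unfold Spec_compute_checksums; infer_instance

-- ===== CLAIM (what is proved, stated in full; the proofs are below) =====
def Claim_equal_compute_checksums : Prop := ∀ (file_bytes : List Int), Dom_compute_checksums file_bytes → Pre_compute_checksums file_bytes → Spec_compute_checksums file_bytes (compute_checksums file_bytes)

-- ===== LEMMAS AND PROOFS =====

-- reference: the list of per-chunk checksums, chunk by chunk
def chunksSpec : List Int → List Int
  | [] => []
  | h :: t => PySem.Int.mod (t.take h.toNat).sum 256 :: chunksSpec (t.drop h.toNat)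
termination_by t => t.length
decreasing_by simp

theorem chunksSpec_nil : chunksSpec [] = [] := by rw [chunksSpec.eq_def]

theorem chunksSpec_cons (h : Int) (t : List Int) :
    chunksSpec (h :: t) = PySem.Int.mod (t.take h.toNat).sum 256 :: chunksSpec (t.drop h.toNat) := by
  rw [chunksSpec.eq_def]

theorem go_eq_chunks (fb : List Int) (hpre : ∀ x ∈ fb, 0 ≤ x) :
    ∀ (fuel : Nat) (index : Int) (cs : List Int), 0 ≤ index →
      fb.length - index.toNat < fuel →
      compute_checksums_go fb fuel index cs = cs ++ chunksSpec (fb.drop index.toNat) := by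
  intro fuel
  induction fuel with
  | zero => intro index cs _ h; omega
  | succ f ih =>
    intro index cs h0 hf
    unfold compute_checksums_go
    by_cases hlt : index < PySem.List.len fb
    · have hlen : index.toNat < fb.length := by
        simp [PySem.List.len] at hlt; omega
      have hget := PySem.List.pyGet?_eq_some_getElem fb h0 (by simpa [PySem.List.len] using hlt)
      rw [if_pos hlt, hget]
      dsimp only
      have hhnn : 0 ≤ fb[index.toNat] := hpre _ (List.getElem_mem hlen)
      have hdrop : fb.drop index.toNat = fb[index.toNat] :: fb.drop (index.toNat + 1) := by
        rw [List.drop_eq_getElem_cons hlen]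
      have hslice : PySem.List.slice fb (some (index + 1)) (some (index + 1 + fb[index.toNat])) =
          (fb.drop (index.toNat + 1)).take fb[index.toNat].toNat := by
        rw [PySem.List.slice_toNat fb (by omega) (by omega)]
        have h1 : (index + 1).toNat = index.toNat + 1 := by omega
        rw [h1]
        congr 1
        omega
      have hdd : fb.drop (index + fb[index.toNat] + 1).toNat =
          (fb.drop (index.toNat + 1)).drop fb[index.toNat].toNat := by
        rw [List.drop_drop]
        congr 1; omega
      have hfuel : fb.length - (index + fb[index.toNat] + 1).toNat < f := by omega
      rw [ih (index + fb[index.toNat] + 1) (cs ++ [_]) (by omega) hfuel]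
      rw [hdrop, chunksSpec_cons]
      rw [hslice, hdd]
      simp
    · rw [if_neg hlt]
      have : fb.length ≤ index.toNat := by
        simp [PySem.List.len] at hlt; omega
      rw [List.drop_eq_nil_of_le this, chunksSpec_nil]
      simp

theorem fold_eq_chunks (t : List Int) (hpre : ∀ x ∈ t, 0 ≤ x) :
    ∀ (cs : List Int) (r s : Int), 0 ≤ r →
      compute_checksums_finish (t.foldl compute_checksums_altStep (cs, r, s, true)) =
      cs ++ [PySem.Int.mod (s + (t.take r.toNat).sum) 256] ++ chunksSpec (t.drop r.toNat) := by
  induction t with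
  | nil => intro cs r s _; simp [compute_checksums_finish, chunksSpec_nil]
  | cons h t ih =>
    intro cs r s hr
    have hh : 0 ≤ h := hpre _ (by simp)
    have hpre' : ∀ x ∈ t, 0 ≤ x := fun x hx => hpre x (by simp [hx])
    by_cases hr0 : r = 0
    · subst hr0
      have hstep : compute_checksums_altStep (cs, 0, s, true) h = (cs ++ [PySem.Int.mod s 256], h, 0, true) := by
        simp [compute_checksums_altStep]
      rw [List.foldl_cons, hstep, ih hpre' _ h 0 hh]
      simp [chunksSpec_cons]
    · have hstep : compute_checksums_altStep (cs, r, s, true) h = (cs, r - 1, s + h, true) := by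
        simp [compute_checksums_altStep, hr0]
      rw [List.foldl_cons, hstep, ih hpre' cs (r - 1) (s + h) (by omega)]
      have htk : (h :: t).take r.toNat = h :: t.take (r - 1).toNat := by
        have : r.toNat = (r - 1).toNat + 1 := by omega
        rw [this, List.take_succ_cons]
      have hdr : (h :: t).drop r.toNat = t.drop (r - 1).toNat := by
        have : r.toNat = (r - 1).toNat + 1 := by omega
        rw [this, List.drop_succ_cons]
      rw [htk, hdr]
      simp [add_assoc]

theorem alt_eq_chunks (fb : List Int) (hpre : ∀ x ∈ fb, 0 ≤ x) :
    compute_checksums_alt fb = chunksSpec fb := by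
  cases fb with
  | nil => simp [compute_checksums_alt, compute_checksums_finish, chunksSpec_nil]
  | cons h t =>
    have hh : 0 ≤ h := hpre _ (by simp)
    have hpre' : ∀ x ∈ t, 0 ≤ x := fun x hx => hpre x (by simp [hx])
    unfold compute_checksums_alt
    rw [List.foldl_cons]
    have hstep : compute_checksums_altStep ([], 0, 0, false) h = ([], h, 0, true) := by
      simp [compute_checksums_altStep]
    rw [hstep, fold_eq_chunks t hpre' [] h 0 hh, chunksSpec_cons]
    simp

-- ===== VERDICT (by name: the statement is the Claim_ definition above) =====
theorem compute_checksums_spec : Claim_equal_compute_checksums := by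
  intro fb _ hpre
  unfold Spec_compute_checksums compute_checksums
  rw [go_eq_chunks fb hpre (fb.length + 1) 0 [] le_rfl (by simp), alt_eq_chunks fb hpre]
  simp
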